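-- pv_equiv track=rewrite | github.com/niuheshui/CS61A | Discussion1/Q7.py | unique_digits
-- ===== SOURCE A (Python) =====
-- def unique_digits(n):
--     """Return the number of unique digits in positive integer n.
--
--     >>> unique_digits(8675309) # All are unique
--     7
--     >>> unique_digits(13173131) # 1, 3, and 7
--     3
--     >>> unique_digits(101) # 0 and 1
--     2
--     """
--     "*** YOUR CODE HERE ***"
--     unique = 0
--     i = 0
--     while i < 10:
--         if has_digit(n, i):
--             unique += 1
--         i += 1
--     return unique
--
-- def has_digit(n, k):
--     """Returns whether k is a digit in n.
--
--     >>> has_digit(10, 1)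
--     True
--     >>> has_digit(12, 7)
--     False
--     """
--     assert k >= 0 and k < 10
--     "*** YOUR CODE HERE ***"
--     while n > 0:
--         last = n % 10
--         n = n // 10
--         if last == k:
--             return True
--     return False
-- ===== SOURCE B (Python) =====
-- def unique_digits(n):
--     """Return the number of unique digits in positive integer n."""
--     seen = set()
--     while n > 0:
--         seen.add(n % 10)
--         n = n // 10
--     return len(seen)
-- ===== Notes on version B (the rewrite author's own statement) =====
-- stated objective: simpler
-- what changed: B extracts each digit of n once into a set in a single halving loop and returns its size, instead of A's scan of all digits of n separately for each candidate digit 0..9; the helper has_digit disappears.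
import Mathlib
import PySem

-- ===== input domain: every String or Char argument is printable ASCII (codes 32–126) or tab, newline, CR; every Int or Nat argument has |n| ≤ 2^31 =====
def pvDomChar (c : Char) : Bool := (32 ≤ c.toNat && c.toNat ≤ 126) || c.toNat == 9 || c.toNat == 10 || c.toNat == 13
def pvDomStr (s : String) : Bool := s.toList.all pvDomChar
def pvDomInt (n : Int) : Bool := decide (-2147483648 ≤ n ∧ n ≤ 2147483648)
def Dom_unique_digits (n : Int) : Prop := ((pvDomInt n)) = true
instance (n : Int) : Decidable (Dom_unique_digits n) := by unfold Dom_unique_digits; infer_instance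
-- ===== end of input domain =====

-- B replaces A's per-candidate digit scan (has_digit for each of 0..9) by one pass
-- collecting the digits of n into a set; objective: simpler (no has_digit helper).

-- ===== PORT A =====
-- while n > 0: last = n % 10; n = n // 10; if last == k: return True; return False
def hasDigit (n k : Int) : Bool :=
  if 0 < n then
    let last := PySem.Int.mod n 10
    let n' := PySem.Int.floordiv n 10
    if last = k then true else hasDigit n' k
  else false
termination_by n.toNat
decreasing_by
  rw [PySem.Int.floordiv_eq_ediv_of_pos (by omega)]
  omega

-- unique = 0; i = 0; while i < 10: if has_digit(n, i): unique += 1; i += 1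
def unique_digits (n : Int) : Int :=
  (PySem.List.pyRange 0 10 1).foldl (fun acc i => if hasDigit n i then acc + 1 else acc) 0

-- ===== PORT B =====
-- seen = set(); while n > 0: seen.add(n % 10); n = n // 10
def digitsLoop (n : Int) (seen : PySem.Set Int) : PySem.Set Int :=
  if 0 < n then
    digitsLoop (PySem.Int.floordiv n 10) (PySem.Set.add seen (PySem.Int.mod n 10))
  else seen
termination_by n.toNat
decreasing_by
  rw [PySem.Int.floordiv_eq_ediv_of_pos (by omega)]
  omega

def unique_digits_alt (n : Int) : Int :=
  PySem.Set.len (digitsLoop n PySem.Set.empty)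

-- ===== PRECONDITION & SPEC =====
def Spec_unique_digits (n : Int) (out : Int) : Prop := out = unique_digits_alt n
instance (n : Int) (out : Int) : Decidable (Spec_unique_digits n out) := by unfold Spec_unique_digits; infer_instance

-- ===== CLAIM (what is proved, stated in full; the proofs are below) =====
def Claim_equal_unique_digits : Prop := ∀ (n : Int), Dom_unique_digits n → Spec_unique_digits n (unique_digits n)

-- ===== LEMMAS AND PROOFS =====

-- a digit reported by has_digit lies in 0..9
theorem hasDigit_bound (n k : Int) (h : hasDigit n k = true) : 0 ≤ k ∧ k < 10 := by
  induction n using hasDigit.induct k with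
  | case1 x hx last heq =>
    rw [← heq]
    exact ⟨PySem.Int.mod_nonneg x (by omega), PySem.Int.mod_lt x (by omega)⟩
  | case2 x hx last n' hne ih =>
    rw [hasDigit, if_pos hx] at h
    rw [if_neg (show ¬ PySem.Int.mod x 10 = k from hne)] at h
    exact ih h
  | case3 x hx =>
    rw [hasDigit, if_neg hx] at h
    exact absurd h (by simp)

-- membership in B's accumulated set equals "has_digit or already present"
theorem mem_digitsLoop (n : Int) (s : PySem.Set Int) (k : Int) :
    k ∈ digitsLoop n s ↔ k ∈ s ∨ hasDigit n k = true := by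
  induction n, s using digitsLoop.induct with
  | case1 x s hx ih =>
    rw [digitsLoop, if_pos hx, hasDigit, if_pos hx]
    rw [ih]
    simp only [PySem.Set.mem_add]
    by_cases hk : PySem.Int.mod x 10 = k
    · rw [if_pos hk]
      simp only [hk]
      tauto
    · rw [if_neg hk]
      have hk' : ¬ k = PySem.Int.mod x 10 := fun h => hk h.symm
      tauto
  | case2 x s hx =>
    rw [digitsLoop, if_neg hx, hasDigit, if_neg hx]
    simp
theorem nodup_digitsLoop (n : Int) (s : PySem.Set Int) (hs : s.Nodup) :
    (digitsLoop n s).Nodup := by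
  induction n, s using digitsLoop.induct with
  | case1 x s hx ih => rw [digitsLoop, if_pos hx]; exact ih (PySem.Set.nodup_add s _ hs)
  | case2 x s hx => rw [digitsLoop, if_neg hx]; exact hs

-- ===== VERDICT (by name: the statement is the Claim_ definition above) =====
theorem unique_digits_spec : Claim_equal_unique_digits := by
  intro n _
  show unique_digits n = unique_digits_alt n
  unfold unique_digits unique_digits_alt
  rw [PySem.List.foldl_count_if]
  have hnd : (digitsLoop n PySem.Set.empty).Nodup :=
    nodup_digitsLoop n _ List.nodup_nil
  have hmem : ∀ k, k ∈ digitsLoop n PySem.Set.empty ↔ hasDigit n k = true := by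
    intro k
    rw [mem_digitsLoop]
    simp [PySem.Set.empty]
  have hperm : List.Perm ((PySem.List.pyRange 0 10).filter (fun i => hasDigit n i))
      (digitsLoop n PySem.Set.empty) := by
    rw [List.perm_ext_iff_of_nodup
      (List.Nodup.filter _ (PySem.List.nodup_pyRange_one 0 10)) hnd]
    intro k
    rw [List.mem_filter, hmem k, PySem.List.mem_pyRange_one]
    constructor
    · rintro ⟨_, h⟩; exact h
    · intro h
      exact ⟨⟨(hasDigit_bound n k h).1, (hasDigit_bound n k h).2⟩, h⟩
  rw [List.countP_eq_length_filter] at *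
  simp only [PySem.Set.len]
  rw [hperm.length_eq]
  omega
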